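-- pv_equiv track=rewrite | github.com/martinshane/search-intel | api/analysis/module_5_gameplan.py | _generate_serp_feature_instructions
-- ===== SOURCE A (Python) =====
-- from typing import Dict, Any, List, Optional
--
-- def _generate_serp_feature_instructions(keyword_data: Dict[str, Any]) -> str:
--     """Generate specific instructions for SERP feature optimization."""
--     features = keyword_data.get("features_above", [])
--     instructions = []
--
--     for feature in features:
--         feature_lower = str(feature).lower()
--         if "featured_snippet" in feature_lower:
--             instructions.append("Format content for featured snippet (use clear definitions, lists, tables)")
--         elif "paa" in feature_lower or "people_also_ask" in feature_lower:
--             instructions.append("Add FAQ schema and answer related questions in content")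
--         elif "video" in feature_lower:
--             instructions.append("Consider adding video content and video schema")
--         elif "local" in feature_lower:
--             instructions.append("Optimize local SEO signals (NAP, local schema)")
--
--     if not instructions:
--         instructions.append("Optimize for SERP features present on this keyword")
--
--     return ". ".join(instructions) + "."
-- ===== SOURCE B (Python) =====
-- def _classify(feature):
--     """Instruction for one SERP feature, or None if it matches no rule."""
--     fl = str(feature).lower()
--     if "featured_snippet" in fl:
--         return "Format content for featured snippet (use clear definitions, lists, tables)"
--     if "paa" in fl or "people_also_ask" in fl:
--         return "Add FAQ schema and answer related questions in content"
--     if "video" in fl: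
--         return "Consider adding video content and video schema"
--     if "local" in fl:
--         return "Optimize local SEO signals (NAP, local schema)"
--     return None
--
--
-- def _generate_serp_feature_instructions(keyword_data):
--     """Generate specific instructions for SERP feature optimization."""
--     body = None
--     for feature in reversed(keyword_data.get("features_above", [])):
--         head = _classify(feature)
--         if head is not None:
--             body = head if body is None else head + ". " + body
--     if body is None:
--         body = "Optimize for SERP features present on this keyword"
--     return body + "."
-- ===== Notes on version B (the rewrite author's own statement) =====
-- stated objective: alternative
-- what changed: Replaces the forward loop that appends into an instruction list and then '. '.join()s it (with a fallback appended to the list) by a per-feature Optional classifier and a backward pass over reversed(features) that prepends each hit to an Optional string accumulator, so the joined text is synthesized directly back-to-front with no intermediate list, no join, and the fallback handled on the None result.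
import Mathlib
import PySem

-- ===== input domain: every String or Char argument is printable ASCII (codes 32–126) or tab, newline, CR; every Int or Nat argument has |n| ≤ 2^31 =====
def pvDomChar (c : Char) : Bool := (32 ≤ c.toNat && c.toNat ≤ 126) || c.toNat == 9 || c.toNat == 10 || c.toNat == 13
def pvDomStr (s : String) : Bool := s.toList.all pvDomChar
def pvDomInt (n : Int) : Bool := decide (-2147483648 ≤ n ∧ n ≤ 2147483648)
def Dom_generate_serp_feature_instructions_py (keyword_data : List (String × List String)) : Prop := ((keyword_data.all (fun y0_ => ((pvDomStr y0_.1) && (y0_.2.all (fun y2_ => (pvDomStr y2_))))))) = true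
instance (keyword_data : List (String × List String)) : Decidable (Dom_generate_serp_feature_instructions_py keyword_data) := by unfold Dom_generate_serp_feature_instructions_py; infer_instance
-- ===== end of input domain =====

-- B replaces A's append-into-a-list-then-join loop by an Optional per-feature classifier and a backward pass over the reversed features that builds the joined text directly (alternative decomposition; same cost).


-- ===== PORT A =====
def generate_serp_feature_instructions_py (keyword_data : List (String × List String)) : String :=
  -- keyword_data.get("features_above", []) — assoc-list first-match lookup
  let features := ((keyword_data.find? (fun p => p.1 == "features_above")).map Prod.snd).getD []
  let instructions := features.foldl (fun acc feature =>
    let feature_lower := PySem.Str.lower feature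
    if PySem.Str.isIn "featured_snippet" feature_lower then
      acc ++ ["Format content for featured snippet (use clear definitions, lists, tables)"]
    else if PySem.Str.isIn "paa" feature_lower || PySem.Str.isIn "people_also_ask" feature_lower then
      acc ++ ["Add FAQ schema and answer related questions in content"]
    else if PySem.Str.isIn "video" feature_lower then
      acc ++ ["Consider adding video content and video schema"]
    else if PySem.Str.isIn "local" feature_lower then
      acc ++ ["Optimize local SEO signals (NAP, local schema)"]
    else acc) []
  let instructions := if instructions = [] then ["Optimize for SERP features present on this keyword"] else instructions
  PySem.Str.join ". " instructions ++ "."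

-- ===== PORT B =====
-- Source B's _classify: instruction for one feature, or none if it matches no rule
def pvClassify (feature : String) : Option String :=
  let fl := PySem.Str.lower feature
  if PySem.Str.isIn "featured_snippet" fl then
    some "Format content for featured snippet (use clear definitions, lists, tables)"
  else if PySem.Str.isIn "paa" fl || PySem.Str.isIn "people_also_ask" fl then
    some "Add FAQ schema and answer related questions in content"
  else if PySem.Str.isIn "video" fl then
    some "Consider adding video content and video schema"
  else if PySem.Str.isIn "local" fl then
    some "Optimize local SEO signals (NAP, local schema)"
  else none

-- Source B's backward loop body: prepend the classifier's hit (if any) to the optional body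
def pvStepB (body : Option String) (feature : String) : Option String :=
  match pvClassify feature with
  | none => body
  | some head => some (match body with | none => head | some r => head ++ ". " ++ r)

def generate_serp_feature_instructions_py_alt (keyword_data : List (String × List String)) : String :=
  let features := ((keyword_data.find? (fun p => p.1 == "features_above")).map Prod.snd).getD []
  -- for feature in reversed(features): … — backward pass building the joined text directly
  let body := (features.reverse.foldl pvStepB none).getD "Optimize for SERP features present on this keyword"
  body ++ "."

-- ===== PRECONDITION & SPEC =====
def Spec_generate_serp_feature_instructions_py (keyword_data : List (String × List String)) (out : String) : Prop := out = generate_serp_feature_instructions_py_alt keyword_data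
instance (keyword_data : List (String × List String)) (out : String) : Decidable (Spec_generate_serp_feature_instructions_py keyword_data out) := by unfold Spec_generate_serp_feature_instructions_py; infer_instance

-- ===== CLAIM =====
def Claim_equal_generate_serp_feature_instructions_py : Prop := ∀ (keyword_data : List (String × List String)), Dom_generate_serp_feature_instructions_py keyword_data → Spec_generate_serp_feature_instructions_py keyword_data (generate_serp_feature_instructions_py keyword_data)

-- ===== LEMMAS AND PROOFS =====

theorem str_join_singleton (sep s : String) : PySem.Str.join sep [s] = s := by
  simp [PySem.Str.join, PySem.Chars.join]
  simp [List.intercalate]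

theorem str_join_cons_cons (sep a b : String) (l : List String) :
    PySem.Str.join sep (a :: b :: l) = a ++ sep ++ PySem.Str.join sep (b :: l) := by
  simp [PySem.Str.join, PySem.Chars.join_cons_cons, String.append_assoc]

-- A's loop body appends exactly the classifier's hit (if any)
theorem pv_step_eq (acc : List String) (feature : String) :
    (let feature_lower := PySem.Str.lower feature
     if PySem.Str.isIn "featured_snippet" feature_lower then
       acc ++ ["Format content for featured snippet (use clear definitions, lists, tables)"]
     else if PySem.Str.isIn "paa" feature_lower || PySem.Str.isIn "people_also_ask" feature_lower then
       acc ++ ["Add FAQ schema and answer related questions in content"]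
     else if PySem.Str.isIn "video" feature_lower then
       acc ++ ["Consider adding video content and video schema"]
     else if PySem.Str.isIn "local" feature_lower then
       acc ++ ["Optimize local SEO signals (NAP, local schema)"]
     else acc)
    = acc ++ (pvClassify feature).elim [] (fun h => [h]) := by
  simp only [pvClassify]
  split_ifs <;> simp

-- the classifier-hit fold collects exactly the classifier's hits, in order
theorem pv_fold_elim (feats : List String) : ∀ (acc : List String),
    feats.foldl (fun acc feature => acc ++ (pvClassify feature).elim [] fun h => [h]) acc
      = acc ++ feats.filterMap pvClassify := by
  induction feats with
  | nil => intro acc; simp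
  | cons f rest ih =>
      intro acc
      simp only [List.foldl_cons]
      rw [ih]
      cases hc : pvClassify f <;> simp [hc]

-- A's loop collects exactly the classifier's hits, in order
theorem pv_fold_eq (feats : List String) : ∀ (acc : List String),
    feats.foldl (fun acc feature =>
      let feature_lower := PySem.Str.lower feature
      if PySem.Str.isIn "featured_snippet" feature_lower then
        acc ++ ["Format content for featured snippet (use clear definitions, lists, tables)"]
      else if PySem.Str.isIn "paa" feature_lower || PySem.Str.isIn "people_also_ask" feature_lower then
        acc ++ ["Add FAQ schema and answer related questions in content"]
      else if PySem.Str.isIn "video" feature_lower then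
        acc ++ ["Consider adding video content and video schema"]
      else if PySem.Str.isIn "local" feature_lower then
        acc ++ ["Optimize local SEO signals (NAP, local schema)"]
      else acc) acc
    = acc ++ feats.filterMap pvClassify := by
  intro acc
  simp only [pv_step_eq]
  exact pv_fold_elim feats acc

-- B's backward pass computes the '. '-join of the classifier's hits (none if there are no hits)
theorem pv_render_eq (feats : List String) :
    feats.reverse.foldl pvStepB none
      = match feats.filterMap pvClassify with
        | [] => none
        | l  => some (PySem.Str.join ". " l) := by
  rw [List.foldl_reverse]
  induction feats with
  | nil => rfl
  | cons f rest ih =>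
      rw [List.foldr_cons, ih]
      simp only [List.filterMap_cons]
      cases hc : pvClassify f with
      | none => simp only [pvStepB, hc]
      | some h =>
          cases hr : rest.filterMap pvClassify with
          | nil => simp [pvStepB, hc, str_join_singleton]
          | cons b l => simp [pvStepB, hc, str_join_cons_cons]

-- ===== VERDICT =====
theorem generate_serp_feature_instructions_py_spec : Claim_equal_generate_serp_feature_instructions_py := by
  intro keyword_data _
  unfold Spec_generate_serp_feature_instructions_py
  unfold generate_serp_feature_instructions_py generate_serp_feature_instructions_py_alt
  simp only [pv_fold_eq, List.nil_append, pv_render_eq]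
  cases h : (((keyword_data.find? (fun p => p.1 == "features_above")).map Prod.snd).getD []).filterMap pvClassify with
  | nil => simp [str_join_singleton]
  | cons b l => simp
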